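-- pv_equiv track=rewrite | github.com/liskos/jakov | ege17/326.py | f
-- ===== SOURCE A (Python) =====
-- def f(x, v, c):
--     n = x + v + c
--     s = ""
--     t = "01234"
--     while n > 0:
--         s = t[n%5] + s
--         n //= 5
--     return s == s[::-1]
-- ===== SOURCE B (Python) =====
-- def f(x, v, c):
--     n = x + v + c
--     rev, m = 0, n
--     while m > 0:
--         rev = rev * 5 + m % 5
--         m //= 5
--     return n <= 0 or rev == n
-- ===== Notes on version B (the rewrite author's own statement) =====
-- stated objective: alternative
-- what changed: Instead of building the base-5 digit string and comparing it with its slice-reversal, B reverses the number's base-5 digits arithmetically (rev = rev*5 + m%5) and tests rev == n, with n <= 0 giving True exactly as A's empty string does.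
import Mathlib
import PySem

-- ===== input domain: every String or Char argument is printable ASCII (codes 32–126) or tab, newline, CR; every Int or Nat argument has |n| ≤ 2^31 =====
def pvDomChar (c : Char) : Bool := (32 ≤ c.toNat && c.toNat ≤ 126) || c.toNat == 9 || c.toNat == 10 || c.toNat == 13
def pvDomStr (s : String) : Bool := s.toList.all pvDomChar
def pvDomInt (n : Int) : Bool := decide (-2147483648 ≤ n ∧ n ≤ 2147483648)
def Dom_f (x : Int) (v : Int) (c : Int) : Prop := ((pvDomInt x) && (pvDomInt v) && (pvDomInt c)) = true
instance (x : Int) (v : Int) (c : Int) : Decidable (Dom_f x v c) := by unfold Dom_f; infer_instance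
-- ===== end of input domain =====

-- B reverses the base-5 digits arithmetically (rev = rev*5 + m%5) and tests rev == n,
-- instead of A's building the digit string and comparing with its slice-reversal.

-- ===== PORT A =====
-- the while loop of A: s = t[n%5] + s; n //= 5   (the index n%5 is always in range of "01234",
-- so the Option from pyGet? is always some; Option.toList renders the one-character string t[n%5])
def fA_loop (n : Int) (s : String) : String :=
  if _h : 0 < n then
    fA_loop (PySem.Int.floordiv n 5)
      (String.ofList ((PySem.Str.pyGet? "01234" (PySem.Int.mod n 5)).toList ++ s.toList))
  else s
termination_by n.toNat
decreasing_by
  rw [PySem.Int.floordiv_eq_ediv_of_pos (by norm_num)]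
  omega

def f (x : Int) (v : Int) (c : Int) : Bool :=
  let n := x + v + c
  let s := fA_loop n ""
  s == ((PySem.Str.slice? s none none (-1)).getD "")

-- ===== PORT B =====
-- the while loop of B: rev = rev*5 + m%5; m //= 5
def fB_loop (rev : Int) (m : Int) : Int :=
  if _h : 0 < m then
    fB_loop (rev * 5 + PySem.Int.mod m 5) (PySem.Int.floordiv m 5)
  else rev
termination_by m.toNat
decreasing_by
  rw [PySem.Int.floordiv_eq_ediv_of_pos (by norm_num)]
  omega

def f_alt (x : Int) (v : Int) (c : Int) : Bool :=
  let n := x + v + c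
  let rev := fB_loop 0 n
  decide (n ≤ 0) || (rev == n)

-- ===== PRECONDITION & SPEC =====
def Spec_f (x : Int) (v : Int) (c : Int) (out : Bool) : Prop := out = f_alt x v c
instance (x : Int) (v : Int) (c : Int) (out : Bool) : Decidable (Spec_f x v c out) := by unfold Spec_f; infer_instance

-- ===== CLAIM (what is proved, stated in full; the proofs are below) =====
def Claim_equal_f : Prop := ∀ (x : Int) (v : Int) (c : Int), Dom_f x v c → Spec_f x v c (f x v c)

-- ===== LEMMAS AND PROOFS =====

-- base-5 digits of n, least significant first
def digs (n : Int) : List Int :=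
  if _h : 0 < n then n % 5 :: digs (n / 5) else []
termination_by n.toNat
decreasing_by omega

-- the digit character
def dchar (d : Int) : Char :=
  if d = 0 then '0' else if d = 1 then '1' else if d = 2 then '2'
  else if d = 3 then '3' else '4'

-- value of a least-significant-first digit list
def W : List Int → Int
  | [] => 0
  | d :: ds => d + 5 * W ds

theorem pyget_chr (i : Int) (h0 : 0 ≤ i) (h5 : i < 5) :
    (PySem.Str.pyGet? "01234" i).toList = [dchar i] := by
  interval_cases i <;> decide

theorem digs_bounds (n : Int) : ∀ d ∈ digs n, 0 ≤ d ∧ d < 5 := by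
  rw [digs]
  split
  · rename_i h
    intro d hd
    rcases List.mem_cons.mp hd with h1 | h1
    · subst h1; constructor
      · exact Int.emod_nonneg n (by norm_num)
      · exact Int.emod_lt_of_pos n (by norm_num)
    · exact digs_bounds (n / 5) d h1
  · simp
termination_by n.toNat
decreasing_by omega

theorem fA_loop_eq (n : Int) (s : String) :
    fA_loop n s = String.ofList (((digs n).map dchar).reverse ++ s.toList) := by
  rw [fA_loop, digs]
  split
  · rename_i h
    rw [PySem.Int.floordiv_eq_ediv_of_pos (by norm_num),
        PySem.Int.mod_eq_emod_of_pos (by norm_num)]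
    rw [fA_loop_eq (n / 5)]
    rw [pyget_chr _ (Int.emod_nonneg n (by norm_num)) (Int.emod_lt_of_pos n (by norm_num))]
    simp [String.toList_ofList]
  · simp [String.ofList_toList]
termination_by n.toNat
decreasing_by omega

theorem fB_loop_eq (rev : Int) (m : Int) :
    fB_loop rev m = (digs m).foldl (fun a d => a * 5 + d) rev := by
  rw [fB_loop, digs]
  split
  · rename_i h
    rw [PySem.Int.floordiv_eq_ediv_of_pos (by norm_num),
        PySem.Int.mod_eq_emod_of_pos (by norm_num)]
    rw [fB_loop_eq]
    simp
  · simp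
termination_by m.toNat
decreasing_by omega

theorem W_append_single (l : List Int) (d : Int) :
    W (l ++ [d]) = W l + 5 ^ l.length * d := by
  induction l with
  | nil => simp [W]
  | cons e t ih => simp [W, ih, pow_succ]; ring

theorem foldl_eq_W_rev (l : List Int) (a : Int) :
    l.foldl (fun a d => a * 5 + d) a = a * 5 ^ l.length + W l.reverse := by
  induction l generalizing a with
  | nil => simp [W]
  | cons d t ih =>
    simp only [List.foldl_cons, ih, List.reverse_cons, W_append_single, List.length_cons,
      List.length_reverse, pow_succ]
    ring

theorem digs_val (n : Int) (h : 0 ≤ n) : W (digs n) = n := by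
  rw [digs]
  split
  · rename_i h1
    simp only [W]
    rw [digs_val (n / 5) (by omega)]
    omega
  · simp [W]; omega
termination_by n.toNat
decreasing_by omega

theorem W_inj : ∀ (l1 l2 : List Int), l1.length = l2.length →
    (∀ d ∈ l1, 0 ≤ d ∧ d < 5) → (∀ d ∈ l2, 0 ≤ d ∧ d < 5) → W l1 = W l2 → l1 = l2 := by
  intro l1
  induction l1 with
  | nil => intro l2 hlen _ _ _; exact (List.length_eq_zero_iff.mp hlen.symm).symm ▸ rfl
  | cons d1 t1 ih =>
    intro l2 hlen hb1 hb2 hw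
    cases l2 with
    | nil => simp at hlen
    | cons d2 t2 =>
      simp only [W] at hw
      have b1 := hb1 d1 (by simp)
      have b2 := hb2 d2 (by simp)
      have hd : d1 = d2 ∧ W t1 = W t2 := by omega
      have := ih t2 (by simpa using hlen) (fun d hd => hb1 d (by simp [hd]))
        (fun d hd => hb2 d (by simp [hd])) hd.2
      simp [hd.1, this]

theorem dchar_inj (d1 d2 : Int) (b1 : 0 ≤ d1 ∧ d1 < 5) (b2 : 0 ≤ d2 ∧ d2 < 5)
    (h : dchar d1 = dchar d2) : d1 = d2 := by
  obtain ⟨h1, h2⟩ := b1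
  obtain ⟨h3, h4⟩ := b2
  interval_cases d1 <;> interval_cases d2 <;> revert h <;> decide

theorem map_dchar_inj : ∀ (l1 l2 : List Int),
    (∀ d ∈ l1, 0 ≤ d ∧ d < 5) → (∀ d ∈ l2, 0 ≤ d ∧ d < 5) →
    l1.map dchar = l2.map dchar → l1 = l2 := by
  intro l1
  induction l1 with
  | nil => intro l2 _ _ h; cases l2 <;> simp_all
  | cons d1 t1 ih =>
    intro l2 hb1 hb2 h
    cases l2 with
    | nil => simp at h
    | cons d2 t2 =>
      simp only [List.map_cons, List.cons.injEq] at h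
      have hd := dchar_inj d1 d2 (hb1 d1 (by simp)) (hb2 d2 (by simp)) h.1
      have ht := ih t2 (fun d hd => hb1 d (by simp [hd])) (fun d hd => hb2 d (by simp [hd])) h.2
      simp [hd, ht]

-- ===== VERDICT (by name: the statement is the Claim_ definition above) =====

theorem f_spec : Claim_equal_f := by
  unfold Claim_equal_f Spec_f f f_alt
  intro x v c _
  set n := x + v + c with hn
  by_cases h : 0 < n
  · -- the digit list of the sum
    have hA : fA_loop n "" = String.ofList ((digs n).map dchar).reverse := by
      rw [fA_loop_eq]; simp
    have hB : fB_loop 0 n = W (digs n).reverse := by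
      rw [fB_loop_eq, foldl_eq_W_rev]; ring
    simp only [hA, hB, PySem.Str.slice?_none_none_neg_one, Option.getD_some]
    have hllist : (String.ofList ((digs n).map dchar).reverse).toList = ((digs n).map dchar).reverse := by
      simp [String.toList_ofList]
    rw [hllist]
    have hle : ¬ (n ≤ 0) := by omega
    simp only [hle, decide_false, Bool.false_or]
    -- both sides are decides of propositions; show the propositions are equivalent
    have hstr : ∀ (L1 L2 : List Char), (String.ofList L1 = String.ofList L2) ↔ L1 = L2 := by
      intro L1 L2
      constructor
      · intro hE
        have := congrArg String.toList hE
        simpa [String.toList_ofList] using this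
      · intro hE; rw [hE]
    rw [Bool.eq_iff_iff]
    simp only [beq_iff_eq, hstr, List.reverse_reverse]
    constructor
    · intro hEq
      have hlr : (digs n).reverse = digs n :=
        map_dchar_inj _ _ (fun d hd => digs_bounds n d (List.mem_reverse.mp hd))
          (digs_bounds n) (by simpa [List.map_reverse] using hEq)
      rw [hlr, digs_val n (by omega)]
    · intro hEq
      have hlr : (digs n).reverse = digs n :=
        W_inj _ _ (by simp) (fun d hd => digs_bounds n d (List.mem_reverse.mp hd))
          (digs_bounds n) (by rw [hEq, digs_val n (by omega)])
      rw [← List.map_reverse, hlr]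
  · have hA : fA_loop n "" = "" := by rw [fA_loop]; simp [h]
    have hle : n ≤ 0 := by omega
    simp [hA, hle, PySem.Str.slice?_none_none_neg_one]
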